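-- pv_equiv track=rewrite | github.com/sidrat2612/tracely360-lite | tracely360/endpoints.py | _preferred_controller_name
-- ===== SOURCE A (Python) =====
-- def _unique_nonempty(values: list[str]) -> list[str]:
--     seen: set[str] = set()
--     result: list[str] = []
--     for value in values:
--         cleaned = value.strip()
--         if not cleaned or cleaned in seen:
--             continue
--         seen.add(cleaned)
--         result.append(cleaned)
--     return result
--
-- def _preferred_controller_name(controller_candidates: list[str]) -> str | None:
--     candidates = _unique_nonempty(controller_candidates)
--     if not candidates:
--         return None
--     for candidate in candidates:
--         if "::" in candidate or "\\" in candidate: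
--             return candidate
--     return candidates[0]
-- ===== SOURCE B (Python) =====
-- def _preferred_controller_name(controller_candidates: list[str]) -> str | None:
--     first_overall = None
--     for value in controller_candidates:
--         cleaned = value.strip()
--         if not cleaned:
--             continue
--         if "::" in cleaned or "\\" in cleaned:
--             return cleaned
--         if first_overall is None:
--             first_overall = cleaned
--     return first_overall
-- ===== Notes on version B (the rewrite author's own statement) =====
-- stated objective: simpler
-- what changed: Replaced the build-dedup-list-then-scan two-pass structure (with a seen set) by one streaming pass keeping a single first-nonempty accumulator and returning early at the first '::'/backslash match.
import Mathlib
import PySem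

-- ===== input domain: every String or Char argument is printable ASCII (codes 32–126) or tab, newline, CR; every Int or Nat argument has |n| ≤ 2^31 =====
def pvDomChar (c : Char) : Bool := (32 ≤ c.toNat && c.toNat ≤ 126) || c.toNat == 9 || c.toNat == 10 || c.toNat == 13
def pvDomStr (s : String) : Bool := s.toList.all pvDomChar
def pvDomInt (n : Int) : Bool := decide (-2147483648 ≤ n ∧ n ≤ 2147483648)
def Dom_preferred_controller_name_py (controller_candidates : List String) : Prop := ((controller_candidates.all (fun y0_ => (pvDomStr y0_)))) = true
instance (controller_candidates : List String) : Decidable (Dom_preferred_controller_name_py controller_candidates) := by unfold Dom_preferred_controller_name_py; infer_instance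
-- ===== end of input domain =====

-- B replaces A's build-dedup-list-then-scan two passes by one streaming pass with a single
-- first-nonempty accumulator and an early return at the first '::'/backslash match (objective: simpler).

-- ===== PORT A =====
-- helper _unique_nonempty: loop over values with (seen, result) state
def pvUniqueAux (values : List String) (seen : PySem.Set String) (result : List String) : List String :=
  match values with
  | [] => result
  | v :: rest =>
    let cleaned := PySem.Str.strip v
    if cleaned == "" || seen.contains cleaned then
      pvUniqueAux rest seen result
    else
      pvUniqueAux rest (seen.add cleaned) (result ++ [cleaned])

def preferred_controller_name_py (controller_candidates : List String) : Option String :=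
  let candidates := pvUniqueAux controller_candidates PySem.Set.empty []
  if candidates.isEmpty then none
  else
    match candidates.find? (fun c => PySem.Str.isIn "::" c || PySem.Str.isIn "\\" c) with
    | some c => some c
    | none => PySem.List.pyGet? candidates 0

-- ===== PORT B =====
def pvAltLoop (xs : List String) (firstOverall : Option String) : Option String :=
  match xs with
  | [] => firstOverall
  | v :: rest =>
    let cleaned := PySem.Str.strip v
    if cleaned == "" then pvAltLoop rest firstOverall
    else if PySem.Str.isIn "::" cleaned || PySem.Str.isIn "\\" cleaned then some cleaned
    else pvAltLoop rest (match firstOverall with | none => some cleaned | some s => some s)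

def preferred_controller_name_py_alt (controller_candidates : List String) : Option String :=
  pvAltLoop controller_candidates none

-- ===== PRECONDITION & SPEC =====
def Spec_preferred_controller_name_py (controller_candidates : List String) (out : Option String) : Prop := out = preferred_controller_name_py_alt controller_candidates
instance (controller_candidates : List String) (out : Option String) : Decidable (Spec_preferred_controller_name_py controller_candidates out) := by unfold Spec_preferred_controller_name_py; infer_instance

-- ===== CLAIM (what is proved, stated in full; the proofs are below) =====
def Claim_equal_preferred_controller_name_py : Prop := ∀ (controller_candidates : List String), Dom_preferred_controller_name_py controller_candidates → Spec_preferred_controller_name_py controller_candidates (preferred_controller_name_py controller_candidates)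

-- ===== LEMMAS AND PROOFS =====

-- proof-side name for the shared '"::" in c or "\\" in c' test (protects it from bridge simp lemmas)
def pvSpecial (c : String) : Bool := PySem.Str.isIn "::" c || PySem.Str.isIn "\\" c

theorem pvSpecial_eq (c : String) : pvSpecial c = (PySem.Str.isIn "::" c || PySem.Str.isIn "\\" c) := rfl

-- the accumulated result is a prefix of pvUniqueAux's output
theorem pvUniqueAux_acc (xs : List String) (seen : PySem.Set String) (r : List String) :
    pvUniqueAux xs seen r = r ++ pvUniqueAux xs seen [] := by
  induction xs generalizing seen r with
  | nil => simp [pvUniqueAux]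
  | cons v rest ih =>
    simp only [pvUniqueAux]
    split
    · exact ih seen r
    · rw [ih _ (r ++ [_]), ih _ ([] ++ [_])]
      simp

-- the invariant linking A's (seen, result) state to B's firstOverall accumulator
theorem pv_main (xs : List String) (seen : PySem.Set String) (result : List String)
    (h1 : ∀ c, seen.contains c = true ↔ c ∈ result)
    (h2 : ∀ c ∈ result, pvSpecial c = false) :
    (let candidates := pvUniqueAux xs seen result;
     if candidates.isEmpty then none
     else
       match candidates.find? (fun c => pvSpecial c) with
       | some c => some c
       | none => PySem.List.pyGet? candidates 0)
    = pvAltLoop xs result.head? := by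
  induction xs generalizing seen result with
  | nil =>
    simp only [pvUniqueAux, pvAltLoop]
    cases result with
    | nil => simp
    | cons a r =>
      have hf : (a :: r).find? (fun c => pvSpecial c) = none :=
        List.find?_eq_none.mpr (fun x hx => by simp only [h2 x hx]; exact Bool.false_ne_true)
      simp [hf, PySem.List.pyGet?, PySem.List.pyIdx?]
  | cons v rest ih =>
    simp only [pvUniqueAux, pvAltLoop, ← pvSpecial_eq]
    by_cases hc : (PySem.Str.strip v == "") = true
    · simp only [hc, Bool.true_or, if_true]
      exact ih seen result h1 h2
    · rw [Bool.not_eq_true] at hc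
      simp only [hc, Bool.false_or, Bool.false_eq_true, if_false]
      by_cases hs : seen.contains (PySem.Str.strip v) = true
      · -- duplicate: A skips; B's test is false (already in result) and firstOverall stays
        have hmem : PySem.Str.strip v ∈ result := (h1 _).mp hs
        have hp : pvSpecial (PySem.Str.strip v) = false := h2 _ hmem
        obtain ⟨a, r, hr⟩ : ∃ a r, result = a :: r := by
          cases result with
          | nil => simp at hmem
          | cons a r => exact ⟨a, r, rfl⟩
        subst hr
        simp only [hs, if_true, hp, Bool.false_eq_true, if_false, List.head?_cons]
        exact ih seen (a :: r) h1 h2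
      · rw [Bool.not_eq_true] at hs
        simp only [hs, Bool.false_eq_true, if_false]
        by_cases hp : pvSpecial (PySem.Str.strip v) = true
        · -- first special: A finds it first in the deduplicated list; B returns it at once
          simp only [hp, if_true]
          rw [pvUniqueAux_acc]
          have hres : result.find? (fun c => pvSpecial c) = none :=
            List.find?_eq_none.mpr (fun x hx => by simp only [h2 x hx]; exact Bool.false_ne_true)
          have hfind : ((result ++ [PySem.Str.strip v]) ++
              pvUniqueAux rest (seen.add (PySem.Str.strip v)) []).find? (fun c => pvSpecial c)
              = some (PySem.Str.strip v) := by
            rw [List.append_assoc, List.find?_append, hres]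
            simp [hp]
          simp only [List.append_assoc] at hfind ⊢
          rw [hfind]
          simp
        · rw [Bool.not_eq_true] at hp
          simp only [hp, Bool.false_eq_true, if_false]
          have h1' : ∀ c, (seen.add (PySem.Str.strip v)).contains c = true ↔
              c ∈ result ++ [PySem.Str.strip v] := by
            intro c
            rw [PySem.Set.contains_iff, PySem.Set.mem_add]
            rw [← PySem.Set.contains_iff, h1 c]
            simp
          have h2' : ∀ c ∈ result ++ [PySem.Str.strip v], pvSpecial c = false := by
            intro c hcm
            rcases List.mem_append.mp hcm with h | h
            · exact h2 c h
            · simp at h; subst h; exact hp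
          have hih := ih (seen.add (PySem.Str.strip v)) (result ++ [PySem.Str.strip v]) h1' h2'
          rw [hih]
          cases result <;> simp

-- ===== VERDICT (by name: the statement is the Claim_ definition above) =====
theorem preferred_controller_name_py_spec : Claim_equal_preferred_controller_name_py := by
  intro cc _
  unfold Spec_preferred_controller_name_py preferred_controller_name_py preferred_controller_name_py_alt
  have h := pv_main cc PySem.Set.empty []
    (by intro c; simp [PySem.Set.empty])
    (by intro c h; simp at h)
  simp only [← pvSpecial_eq]
  simpa using h
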